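-- pv_equiv track=rewrite | github.com/sammy03f/URAP | part2_rules.py | classify_rules
-- ===== SOURCE A (Python) =====
-- PHRASE_RULES = [
--     # Customer Service / Branch overrides
--     ("customer service", "Customer Service / Branch"),
--     ("bank teller", "Customer Service / Branch"),
--     ("teller", "Customer Service / Branch"),
--     ("branch manager", "Customer Service / Branch"),
--     ("personal banker", "Customer Service / Branch"),
--     ("relationship banker", "Customer Service / Branch"),
--     ("personal banking", "Customer Service / Branch"),
--
--     # Wealth Management
--     ("private wealth", "Wealth Management"),
--     ("wealth management", "Wealth Management"),
--     ("private banker", "Wealth Management"),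
--     ("financial advisor", "Wealth Management"),
--     ("registered representative", "Wealth Management"),
--
--     # Lending / Credit
--     ("mortgage", "Lending / Credit"),
--     ("loan officer", "Lending / Credit"),
--     ("credit analyst", "Lending / Credit"),
--
--     # Compliance
--     ("anti money laundering", "Compliance/Legal"),
--     ("aml", "Compliance/Legal"),
--     ("kyc", "Compliance/Legal"),
--     ("sanctions", "Compliance/Legal"),
--
--     # S&T / Markets
--     ("sales and trading", "Sales & Trading"),
--     ("equity derivatives", "Sales & Trading"),
--     ("fixed income", "Sales & Trading"),
--
--     # IB
--     ("investment banking", "Investment Banking"),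
--     ("leveraged finance", "Investment Banking"),
--     ("capital markets", "Investment Banking"),
--     ("m&a", "Investment Banking"),
--     ("restructuring", "Investment Banking"),
--
--     # Tech
--     ("software engineer", "Technology"),
--     ("software developer", "Technology"),
--     ("information security", "Technology"),
--
-- ]
--
-- KEYWORD_RULES = {
--     "Investment Banking": {"ibd", "banking", "underwriter", "underwriting", "advisory", "restructuring"},
--     "Sales & Trading": {"trader", "trading", "sales", "equities", "options", "futures", "fx", "rates", "derivatives"},
--     "Research": {"research"},
--     "Risk": {"risk"},
--     "Compliance/Legal": {"compliance", "aml", "kyc", "regulatory", "surveillance", "legal"},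
--     "Operations": {"operations", "settlement", "settlements", "clearing", "reconciliation", "processing"},
--     "Technology": {"software", "developer", "engineer", "devops", "infrastructure", "platform", "systems", "security"},
--     "Finance/Accounting": {"finance", "accounting", "controller", "audit", "tax", "reporting"},
--     "Wealth Management": {"advisor", "planner", "broker", "wealth"},
--     "HR": {"recruiter", "recruiting", "talent", "human", "resources"},
--     "Treasury": {"treasury", "liquidity", "cash"},
--     "Product/Strategy": {"product", "strategy", "strategic"},
-- }
--
-- def classify_rules(title_norm: str):
--     t = str(title_norm)
--
--     # phrase rules: first hit wins
--     for phrase, dept in PHRASE_RULES: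
--         if phrase in t:
--             return dept, "phrase", phrase
--
--     # keyword scoring: most freq. dept.
--     words = set(t.split())
--     best_dept, best_score, best_hits = "Unknown", 0, []
--
--     for dept, kws in KEYWORD_RULES.items():
--         hits = words.intersection(kws)
--         score = len(hits)
--         if score > best_score:
--             best_dept, best_score, best_hits = dept, score, sorted(hits)
--
--     if best_score > 0:
--         return best_dept, "keyword", ",".join(best_hits)
--
--     # incase of anything
--     return "Unknown", "none", ""
-- ===== SOURCE B (Python) =====
-- # B: phrase rules as a single first-match search; keyword phase via an inverted
-- # keyword->departments index built once, one pass over the title's words with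
-- # per-department counters and hit lists, then first department (table order)
-- # whose count equals the maximum.
--
-- PHRASE_RULES = [
--     ("customer service", "Customer Service / Branch"),
--     ("bank teller", "Customer Service / Branch"),
--     ("teller", "Customer Service / Branch"),
--     ("branch manager", "Customer Service / Branch"),
--     ("personal banker", "Customer Service / Branch"),
--     ("relationship banker", "Customer Service / Branch"),
--     ("personal banking", "Customer Service / Branch"),
--     ("private wealth", "Wealth Management"),
--     ("wealth management", "Wealth Management"),
--     ("private banker", "Wealth Management"),
--     ("financial advisor", "Wealth Management"),
--     ("registered representative", "Wealth Management"),
--     ("mortgage", "Lending / Credit"),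
--     ("loan officer", "Lending / Credit"),
--     ("credit analyst", "Lending / Credit"),
--     ("anti money laundering", "Compliance/Legal"),
--     ("aml", "Compliance/Legal"),
--     ("kyc", "Compliance/Legal"),
--     ("sanctions", "Compliance/Legal"),
--     ("sales and trading", "Sales & Trading"),
--     ("equity derivatives", "Sales & Trading"),
--     ("fixed income", "Sales & Trading"),
--     ("investment banking", "Investment Banking"),
--     ("leveraged finance", "Investment Banking"),
--     ("capital markets", "Investment Banking"),
--     ("m&a", "Investment Banking"),
--     ("restructuring", "Investment Banking"),
--     ("software engineer", "Technology"),
--     ("software developer", "Technology"),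
--     ("information security", "Technology"),
-- ]
--
-- KEYWORD_RULES = {
--     "Investment Banking": {"ibd", "banking", "underwriter", "underwriting", "advisory", "restructuring"},
--     "Sales & Trading": {"trader", "trading", "sales", "equities", "options", "futures", "fx", "rates", "derivatives"},
--     "Research": {"research"},
--     "Risk": {"risk"},
--     "Compliance/Legal": {"compliance", "aml", "kyc", "regulatory", "surveillance", "legal"},
--     "Operations": {"operations", "settlement", "settlements", "clearing", "reconciliation", "processing"},
--     "Technology": {"software", "developer", "engineer", "devops", "infrastructure", "platform", "systems", "security"},
--     "Finance/Accounting": {"finance", "accounting", "controller", "audit", "tax", "reporting"},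
--     "Wealth Management": {"advisor", "planner", "broker", "wealth"},
--     "HR": {"recruiter", "recruiting", "talent", "human", "resources"},
--     "Treasury": {"treasury", "liquidity", "cash"},
--     "Product/Strategy": {"product", "strategy", "strategic"},
-- }
--
-- # inverted index: keyword -> departments owning it (table order), built once
-- KEYWORD_INDEX = {}
-- for _dept, _kws in KEYWORD_RULES.items():
--     for _kw in _kws:
--         KEYWORD_INDEX.setdefault(_kw, []).append(_dept)
--
--
-- def classify_rules(title_norm: str):
--     t = str(title_norm)
--
--     # phrase rules: first substring hit wins
--     for phrase, dept in PHRASE_RULES: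
--         if phrase in t:
--             return dept, "phrase", phrase
--
--     # one pass over the distinct words, scoring via the inverted index
--     counts = {}
--     hitwords = {}
--     for w in set(t.split()):
--         for dept in KEYWORD_INDEX.get(w, []):
--             counts[dept] = counts.get(dept, 0) + 1
--             hitwords.setdefault(dept, []).append(w)
--
--     if counts:
--         best = max(counts.values())
--         for dept in KEYWORD_RULES:
--             if counts.get(dept, 0) == best:
--                 return dept, "keyword", ",".join(sorted(hitwords[dept]))
--
--     return "Unknown", "none", ""
-- ===== Notes on version B (the rewrite author's own statement) =====
-- stated objective: alternative
-- what changed: A scores each department by intersecting the word set with that department's keyword set (one pass per department); B builds an inverted keyword->departments index once, makes a single counting pass over the title's distinct words accumulating per-department counters and hit lists, then takes the first department in table order whose count equals the maximum.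
import Mathlib
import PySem

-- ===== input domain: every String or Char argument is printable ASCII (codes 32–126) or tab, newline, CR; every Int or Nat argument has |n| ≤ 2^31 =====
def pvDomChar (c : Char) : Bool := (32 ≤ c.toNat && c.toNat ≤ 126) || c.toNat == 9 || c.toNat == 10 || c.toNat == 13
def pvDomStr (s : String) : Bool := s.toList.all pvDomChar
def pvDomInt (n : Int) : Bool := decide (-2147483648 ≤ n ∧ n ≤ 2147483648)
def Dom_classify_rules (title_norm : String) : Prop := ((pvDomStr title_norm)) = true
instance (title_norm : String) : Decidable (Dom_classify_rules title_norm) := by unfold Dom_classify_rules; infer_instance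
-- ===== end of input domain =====

-- B replaces A's per-department set intersections by an inverted keyword→departments
-- index and a single counting pass over the title's distinct words (objective: alternative).

-- ===== PORT A =====
-- shared module-level tables (identical constants in Source A and Source B)
def phraseRules : List (String × String) := [
  ("customer service", "Customer Service / Branch"),
  ("bank teller", "Customer Service / Branch"),
  ("teller", "Customer Service / Branch"),
  ("branch manager", "Customer Service / Branch"),
  ("personal banker", "Customer Service / Branch"),
  ("relationship banker", "Customer Service / Branch"),
  ("personal banking", "Customer Service / Branch"),
  ("private wealth", "Wealth Management"),
  ("wealth management", "Wealth Management"),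
  ("private banker", "Wealth Management"),
  ("financial advisor", "Wealth Management"),
  ("registered representative", "Wealth Management"),
  ("mortgage", "Lending / Credit"),
  ("loan officer", "Lending / Credit"),
  ("credit analyst", "Lending / Credit"),
  ("anti money laundering", "Compliance/Legal"),
  ("aml", "Compliance/Legal"),
  ("kyc", "Compliance/Legal"),
  ("sanctions", "Compliance/Legal"),
  ("sales and trading", "Sales & Trading"),
  ("equity derivatives", "Sales & Trading"),
  ("fixed income", "Sales & Trading"),
  ("investment banking", "Investment Banking"),
  ("leveraged finance", "Investment Banking"),
  ("capital markets", "Investment Banking"),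
  ("m&a", "Investment Banking"),
  ("restructuring", "Investment Banking"),
  ("software engineer", "Technology"),
  ("software developer", "Technology"),
  ("information security", "Technology")]

def keywordRules : List (String × List String) := [
  ("Investment Banking", ["ibd", "banking", "underwriter", "underwriting", "advisory", "restructuring"]),
  ("Sales & Trading", ["trader", "trading", "sales", "equities", "options", "futures", "fx", "rates", "derivatives"]),
  ("Research", ["research"]),
  ("Risk", ["risk"]),
  ("Compliance/Legal", ["compliance", "aml", "kyc", "regulatory", "surveillance", "legal"]),
  ("Operations", ["operations", "settlement", "settlements", "clearing", "reconciliation", "processing"]),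
  ("Technology", ["software", "developer", "engineer", "devops", "infrastructure", "platform", "systems", "security"]),
  ("Finance/Accounting", ["finance", "accounting", "controller", "audit", "tax", "reporting"]),
  ("Wealth Management", ["advisor", "planner", "broker", "wealth"]),
  ("HR", ["recruiter", "recruiting", "talent", "human", "resources"]),
  ("Treasury", ["treasury", "liquidity", "cash"]),
  ("Product/Strategy", ["product", "strategy", "strategic"])]

-- A's phrase loop: 'for phrase, dept in PHRASE_RULES: if phrase in t: return …'
def phraseLoopA : List (String × String) → String → Option (String × String × String)
  | [], _ => none
  | (phrase, dept) :: rest, t =>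
    if PySem.Str.isIn phrase t then some (dept, "phrase", phrase) else phraseLoopA rest t

-- A's keyword loop: running (best_dept, best_score, best_hits) with strict improvement
def kwLoopA : List (String × List String) → List String → String × Int × List String →
    String × Int × List String
  | [], _, best => best
  | (dept, kws) :: rest, words, best =>
    let hits := PySem.Set.inter words kws
    let score : Int := (hits.length : Int)
    if best.2.1 < score then
      kwLoopA rest words (dept, score, PySem.List.sorted hits (fun x => x) false)
    else
      kwLoopA rest words best

def classify_rules (title_norm : String) : String × String × String :=
  let t := title_norm
  match phraseLoopA phraseRules t with
  | some r => r
  | none =>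
    let words : List String := PySem.Set.ofList (PySem.Str.split₀ t)
    let best := kwLoopA keywordRules words ("Unknown", 0, [])
    if 0 < best.2.1 then (best.1, "keyword", PySem.Str.join "," best.2.2)
    else ("Unknown", "none", "")

-- ===== PORT B =====
-- inverted index: keyword → departments owning it, built once from the table
def keywordIndex : PySem.Dict String (List String) :=
  keywordRules.foldl (fun idx p =>
    p.2.foldl (fun idx kw => idx.modify kw [] (· ++ [p.1])) idx) PySem.Dict.empty

-- B's counting pass: for each distinct word, bump every owning department's
-- counter and record the word in that department's hit list
def kwScanB : List String → PySem.Dict String Int × PySem.Dict String (List String) →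
    PySem.Dict String Int × PySem.Dict String (List String)
  | [], st => st
  | w :: ws, st =>
    kwScanB ws ((keywordIndex.getD w []).foldl
      (fun st dept => (st.1.modify dept 0 (· + 1), st.2.modify dept [] (· ++ [w]))) st)

-- B's selection: first department (table order) whose count equals the maximum
def deptPickB : List (String × List String) → PySem.Dict String Int → Int → Option String
  | [], _, _ => none
  | (dept, _) :: rest, counts, best =>
    if counts.getD dept 0 == best then some dept else deptPickB rest counts best

def classify_rules_alt (title_norm : String) : String × String × String :=
  let t := title_norm
  match phraseRules.find? (fun p => PySem.Str.isIn p.1 t) with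
  | some p => (p.2, "phrase", p.1)
  | none =>
    let st := kwScanB (PySem.Set.ofList (PySem.Str.split₀ t)) (PySem.Dict.empty, PySem.Dict.empty)
    if st.1.size ≠ 0 then
      match PySem.List.max? st.1.values (fun x => x) with
      | some best =>
        match deptPickB keywordRules st.1 best with
        | some dept =>
          (dept, "keyword", PySem.Str.join "," (PySem.List.sorted (st.2.getD dept []) (fun x => x) false))
        | none => ("Unknown", "none", "")
      | none => ("Unknown", "none", "")
    else ("Unknown", "none", "")

-- ===== PRECONDITION & SPEC =====
def Spec_classify_rules (title_norm : String) (out : String × String × String) : Prop := out = classify_rules_alt title_norm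
instance (title_norm : String) (out : String × String × String) : Decidable (Spec_classify_rules title_norm out) := by unfold Spec_classify_rules; infer_instance

-- ===== CLAIM (what is proved, stated in full; the proofs are below) =====
def Claim_equal_classify_rules : Prop := ∀ (title_norm : String), Dom_classify_rules title_norm → Spec_classify_rules title_norm (classify_rules title_norm)

-- ===== LEMMAS AND PROOFS =====

theorem phraseLoopA_eq_find? (l : List (String × String)) (t : String) :
    phraseLoopA l t =
      (l.find? (fun p => PySem.Str.isIn p.1 t)).map (fun p => (p.2, "phrase", p.1)) := by
  induction l with
  | nil => rfl
  | cons p rest ih =>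
    obtain ⟨phrase, dept⟩ := p
    cases hc : PySem.Chars.isIn phrase.toList t.toList <;>
      simp [phraseLoopA, List.find?, hc, ih]

-- the inner index-building loop appends d under each key of kws once
theorem idx_inner_getD (kws : List String) (dnm : String) (idx : PySem.Dict String (List String))
    (w : String) (hnd : kws.Nodup) :
    (kws.foldl (fun idx kw => idx.modify kw [] (· ++ [dnm])) idx).getD w [] =
      idx.getD w [] ++ (if w ∈ kws then [dnm] else []) := by
  induction kws generalizing idx with
  | nil => simp
  | cons kw rest ih =>
    simp only [List.foldl_cons]
    rw [ih _ (by exact hnd.of_cons)]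
    rw [PySem.Dict.getD_modify]
    by_cases hw : w = kw
    · subst hw
      have : w ∉ rest := (List.nodup_cons.mp hnd).1
      simp [this]
    · simp [hw, List.mem_cons]

theorem idx_build_getD (table : List (String × List String))
    (idx : PySem.Dict String (List String)) (w : String)
    (hnd : ∀ p ∈ table, p.2.Nodup) :
    (table.foldl (fun idx p => p.2.foldl (fun idx kw => idx.modify kw [] (· ++ [p.1])) idx) idx).getD w [] =
      idx.getD w [] ++ (table.filter (fun p => decide (w ∈ p.2))).map Prod.fst := by
  induction table generalizing idx with
  | nil => simp
  | cons p rest ih =>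
    simp only [List.foldl_cons]
    rw [ih _ (fun q hq => hnd q (List.mem_cons_of_mem _ hq))]
    rw [idx_inner_getD _ _ _ _ (hnd p (List.mem_cons_self))]
    by_cases hw : w ∈ p.2 <;> simp [hw]

theorem keywordIndex_getD (w : String) :
    keywordIndex.getD w [] = (keywordRules.filter (fun p => decide (w ∈ p.2))).map Prod.fst := by
  have h := idx_build_getD keywordRules PySem.Dict.empty w (by decide)
  simpa [keywordIndex] using h

theorem keywordRules_fst_nodup : (keywordRules.map Prod.fst).Nodup := by decide

theorem mem_keywordIndex_getD (w d : String) :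
    d ∈ keywordIndex.getD w [] ↔ ∃ p ∈ keywordRules, p.1 = d ∧ w ∈ p.2 := by
  rw [keywordIndex_getD]
  simp only [List.mem_map, List.mem_filter, decide_eq_true_eq]
  constructor
  · rintro ⟨p, ⟨hp, hw⟩, rfl⟩; exact ⟨p, hp, rfl, hw⟩
  · rintro ⟨p, hp, rfl, hw⟩; exact ⟨p, ⟨hp, hw⟩, rfl⟩

theorem keywordIndex_getD_nodup (w : String) : (keywordIndex.getD w []).Nodup := by
  rw [keywordIndex_getD]
  have hsub : ((keywordRules.filter (fun p => decide (w ∈ p.2))).map Prod.fst).Sublist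
      (keywordRules.map Prod.fst) := List.Sublist.map _ List.filter_sublist
  exact keywordRules_fst_nodup.sublist hsub

-- the nested scan is a flat fold over the (department, word) pair stream
def pairStream (ws : List String) : List (String × String) :=
  ws.flatMap (fun w => (keywordIndex.getD w []).map (fun d => (d, w)))

theorem kwScanB_eq_flat (ws : List String)
    (st : PySem.Dict String Int × PySem.Dict String (List String)) :
    kwScanB ws st = (pairStream ws).foldl
      (fun st p => (st.1.modify p.1 0 (· + 1), st.2.modify p.1 [] (· ++ [p.2]))) st := by
  induction ws generalizing st with
  | nil => rfl
  | cons w ws ih =>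
    simp only [kwScanB, pairStream, List.flatMap_cons, List.foldl_append, List.foldl_map]
    rw [ih]
    rfl

theorem kwScanB_counts_getD (ws : List String) (d : String) :
    (kwScanB ws (PySem.Dict.empty, PySem.Dict.empty)).1.getD d 0 =
      (((pairStream ws).map Prod.fst).count d : Int) := by
  rw [kwScanB_eq_flat]
  rw [PySem.List.foldl_prod_mk (fun c (p : String × String) => PySem.Dict.modify c p.1 0 (· + 1))
    (fun h (p : String × String) => PySem.Dict.modify h p.1 [] (· ++ [p.2])) (pairStream ws)
    PySem.Dict.empty PySem.Dict.empty]
  rw [← List.foldl_map (f := Prod.fst) (g := fun dd x => PySem.Dict.modify dd x 0 (· + 1))]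
  rw [PySem.Dict.getD_foldl_modify_add_one]
  simp

theorem kwScanB_hits_getD (ws : List String) (d : String) :
    (kwScanB ws (PySem.Dict.empty, PySem.Dict.empty)).2.getD d [] =
      ((pairStream ws).filter (fun p => p.1 == d)).map (·.2) := by
  rw [kwScanB_eq_flat]
  rw [PySem.List.foldl_prod_mk (fun c (p : String × String) => PySem.Dict.modify c p.1 0 (· + 1))
    (fun h (p : String × String) => PySem.Dict.modify h p.1 [] (· ++ [p.2])) (pairStream ws)
    PySem.Dict.empty PySem.Dict.empty]
  rw [PySem.Dict.getD_foldl_modify_append]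
  simp

theorem kwScanB_counts_keys (ws : List String) :
    (kwScanB ws (PySem.Dict.empty, PySem.Dict.empty)).1.keys =
      PySem.Set.ofList ((pairStream ws).map Prod.fst) := by
  rw [kwScanB_eq_flat]
  rw [PySem.List.foldl_prod_mk (fun c (p : String × String) => PySem.Dict.modify c p.1 0 (· + 1))
    (fun h (p : String × String) => PySem.Dict.modify h p.1 [] (· ++ [p.2])) (pairStream ws)
    PySem.Dict.empty PySem.Dict.empty]
  rw [PySem.Dict.keys_foldl_modify_key]
  simp [PySem.Set.update, PySem.Set.ofList_eq_foldl, PySem.Dict.keys_empty]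

theorem kwScanB_counts_keys_nodup (ws : List String) :
    (kwScanB ws (PySem.Dict.empty, PySem.Dict.empty)).1.keys.Nodup := by
  rw [kwScanB_counts_keys]
  exact PySem.Set.nodup_ofList _

theorem count_flatMap_nodup (ws : List String) (d : String)
    (g : String → List String) (hnd : ∀ w, (g w).Nodup) :
    (ws.flatMap g).count d = (ws.filter (fun w => decide (d ∈ g w))).length := by
  induction ws with
  | nil => simp
  | cons w ws ih =>
    simp only [List.flatMap_cons, List.count_append, List.filter_cons]
    by_cases hw : d ∈ g w
    · rw [List.count_eq_one_of_mem (hnd w) hw]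
      simp [hw, ih, Nat.add_comm]
    · rw [List.count_eq_zero_of_not_mem hw]
      simp [hw, ih]

theorem pairStream_map_fst (ws : List String) :
    (pairStream ws).map Prod.fst = ws.flatMap (fun w => keywordIndex.getD w []) := by
  simp [pairStream, List.map_flatMap, List.map_map, Function.comp_def]

theorem counts_getD_eq (ws : List String) (d : String) :
    (kwScanB ws (PySem.Dict.empty, PySem.Dict.empty)).1.getD d 0 =
      ((ws.filter (fun w => decide (d ∈ keywordIndex.getD w []))).length : Int) := by
  rw [kwScanB_counts_getD, pairStream_map_fst,
    count_flatMap_nodup ws d _ keywordIndex_getD_nodup]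

theorem filter_pairs_of_nodup (ds : List String) (w d : String) (hnd : ds.Nodup) :
    ((ds.map (fun dd => (dd, w))).filter (fun p => p.1 == d)).map (·.2) =
      if d ∈ ds then [w] else [] := by
  induction ds with
  | nil => simp
  | cons dd ds ih =>
    have hnd' := (List.nodup_cons.mp hnd).2
    by_cases hdd : dd = d
    · subst hdd
      have : dd ∉ ds := (List.nodup_cons.mp hnd).1
      simp [ih hnd', this]
    · simp only [List.map_cons, List.filter_cons]
      simp [hdd, ih hnd', List.mem_cons, Ne.symm hdd]

theorem hits_getD_eq (ws : List String) (d : String) :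
    (kwScanB ws (PySem.Dict.empty, PySem.Dict.empty)).2.getD d [] =
      ws.filter (fun w => decide (d ∈ keywordIndex.getD w [])) := by
  rw [kwScanB_hits_getD]
  induction ws with
  | nil => simp [pairStream]
  | cons w ws ih =>
    simp only [pairStream, List.flatMap_cons, List.filter_append, List.map_append, List.filter_cons]
    rw [filter_pairs_of_nodup _ w d (keywordIndex_getD_nodup w)]
    by_cases hw : d ∈ keywordIndex.getD w []
    · simpa [hw] using congrArg (fun l => w :: l) (by simpa [pairStream] using ih)
    · simpa [hw] using (by simpa [pairStream] using ih)

-- A's per-entry score and the state it stores when an entry takes the lead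
def scOf (words : List String) (p : String × List String) : Int :=
  ((PySem.Set.inter words p.2).length : Int)

def entryOut (words : List String) (p : String × List String) : String × Int × List String :=
  (p.1, scOf words p, PySem.List.sorted (PySem.Set.inter words p.2) (fun x => x) false)

-- A's strict-improvement fold keeps the first entry attaining the maximum score
theorem kwLoopA_char (l : List (String × List String)) (words : List String)
    (b : String × Int × List String) :
    (kwLoopA l words b = b ∧ ∀ p ∈ l, scOf words p ≤ b.2.1) ∨
    (∃ p l1 l2, l = l1 ++ p :: l2 ∧ kwLoopA l words b = entryOut words p ∧
      b.2.1 < scOf words p ∧ (∀ q ∈ l1, scOf words q < scOf words p) ∧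
      (∀ q ∈ l2, scOf words q ≤ scOf words p)) := by
  induction l generalizing b with
  | nil => left; exact ⟨rfl, by simp⟩
  | cons hd rest ih =>
    obtain ⟨dept, kws⟩ := hd
    have hunf : kwLoopA ((dept, kws) :: rest) words b =
        if b.2.1 < scOf words (dept, kws) then
          kwLoopA rest words (entryOut words (dept, kws))
        else kwLoopA rest words b := rfl
    by_cases h : b.2.1 < scOf words (dept, kws)
    · rw [hunf, if_pos h]
      rcases ih (entryOut words (dept, kws)) with ⟨heq, hall⟩ | ⟨p', l1, l2, hl, heq, hlt, h1, h2⟩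
      · right
        exact ⟨(dept, kws), [], rest, by simp, heq, h, by simp, hall⟩
      · right
        refine ⟨p', (dept, kws) :: l1, l2, by rw [hl]; rfl, heq, lt_trans h hlt, ?_, h2⟩
        intro q hq
        rcases List.mem_cons.mp hq with rfl | hq'
        · exact hlt
        · exact h1 q hq'
    · rw [hunf, if_neg h]
      rcases ih b with ⟨heq, hall⟩ | ⟨p', l1, l2, hl, heq, hlt, h1, h2⟩
      · left
        refine ⟨heq, ?_⟩
        intro q hq
        rcases List.mem_cons.mp hq with rfl | hq'
        · omega
        · exact hall q hq'
      · right
        refine ⟨p', (dept, kws) :: l1, l2, by rw [hl]; rfl, heq, hlt, ?_, h2⟩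
        intro q hq
        rcases List.mem_cons.mp hq with rfl | hq'
        · omega
        · exact h1 q hq'

-- B's pick loop returns the first match
theorem deptPickB_first (l1 : List (String × List String)) (p : String × List String)
    (l2 : List (String × List String)) (counts : PySem.Dict String Int) (best : Int)
    (h1 : ∀ q ∈ l1, counts.getD q.1 0 ≠ best) (hp : counts.getD p.1 0 = best) :
    deptPickB (l1 ++ p :: l2) counts best = some p.1 := by
  induction l1 with
  | nil =>
    obtain ⟨dept, kws⟩ := p
    simp only [List.nil_append, deptPickB]
    rw [if_pos (by simpa using hp)]
  | cons q rest ih =>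
    obtain ⟨dept, kws⟩ := q
    have hne : counts.getD dept 0 ≠ best := h1 (dept, kws) List.mem_cons_self
    simp only [List.cons_append, deptPickB]
    rw [if_neg (by simpa using hne)]
    exact ih (fun q hq => h1 q (List.mem_cons_of_mem _ hq))

-- bridge: for a table entry p, owning p.1 in the index is owning w in p's keyword set
theorem idx_mem_iff_entry (p : String × List String) (hp : p ∈ keywordRules) (w : String) :
    p.1 ∈ keywordIndex.getD w [] ↔ w ∈ p.2 := by
  rw [mem_keywordIndex_getD]
  constructor
  · rintro ⟨q, hq, hfst, hw⟩
    have : q = p := List.inj_on_of_nodup_map keywordRules_fst_nodup hq hp hfst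
    rwa [← this]
  · intro hw
    exact ⟨p, hp, rfl, hw⟩

theorem counts_getD_entry (ws : List String) (p : String × List String) (hp : p ∈ keywordRules) :
    (kwScanB ws (PySem.Dict.empty, PySem.Dict.empty)).1.getD p.1 0 =
      ((ws.filter (fun w => decide (w ∈ p.2))).length : Int) := by
  rw [counts_getD_eq]
  have hf : ws.filter (fun w => decide (p.1 ∈ keywordIndex.getD w [])) =
      ws.filter (fun w => decide (w ∈ p.2)) :=
    List.filter_congr (fun w _ => by simp [idx_mem_iff_entry p hp w])
  rw [hf]

theorem hits_getD_entry (ws : List String) (p : String × List String) (hp : p ∈ keywordRules) :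
    (kwScanB ws (PySem.Dict.empty, PySem.Dict.empty)).2.getD p.1 [] =
      ws.filter (fun w => decide (w ∈ p.2)) := by
  rw [hits_getD_eq]
  exact List.filter_congr (fun w _ => by simp [idx_mem_iff_entry p hp w])

theorem inter_perm_filter (ws : List String) (hnd : ws.Nodup) (kws : List String) :
    (PySem.Set.inter ws kws).Perm (ws.filter (fun w => decide (w ∈ kws))) := by
  rw [List.perm_ext_iff_of_nodup (PySem.Set.nodup_inter _ _ hnd) (hnd.filter _)]
  intro a
  simp [PySem.Set.mem_inter, List.mem_filter]

theorem scOf_eq_filter_length (ws : List String) (hnd : ws.Nodup) (p : String × List String) :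
    scOf ws p = ((ws.filter (fun w => decide (w ∈ p.2))).length : Int) := by
  unfold scOf
  exact_mod_cast (inter_perm_filter ws hnd p.2).length_eq

theorem counts_mem_keys (ws : List String) (hnd : ws.Nodup) (d : String) :
    d ∈ (kwScanB ws (PySem.Dict.empty, PySem.Dict.empty)).1.keys ↔
      ∃ p ∈ keywordRules, p.1 = d ∧ 0 < scOf ws p := by
  rw [kwScanB_counts_keys, PySem.Set.mem_ofList, pairStream_map_fst]
  simp only [List.mem_flatMap]
  constructor
  · rintro ⟨w, hw, hd⟩
    obtain ⟨p, hp, hfst, hwp⟩ := (mem_keywordIndex_getD w d).mp hd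
    refine ⟨p, hp, hfst, ?_⟩
    rw [scOf_eq_filter_length ws hnd p]
    have : w ∈ ws.filter (fun w => decide (w ∈ p.2)) := List.mem_filter.mpr ⟨hw, by simpa⟩
    have := List.length_pos_of_mem this
    omega
  · rintro ⟨p, hp, rfl, hpos⟩
    rw [scOf_eq_filter_length ws hnd p] at hpos
    have hne : ws.filter (fun w => decide (w ∈ p.2)) ≠ [] := by
      intro hnil; rw [hnil] at hpos; simp at hpos
    obtain ⟨w, hw⟩ := List.exists_mem_of_ne_nil _ hne
    obtain ⟨hws, hwp⟩ := List.mem_filter.mp hw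
    exact ⟨w, hws, (mem_keywordIndex_getD w p.1).mpr ⟨p, hp, rfl, by simpa using hwp⟩⟩

-- ===== VERDICT (by name: the statement is the Claim_ definition above) =====
theorem classify_rules_spec : Claim_equal_classify_rules := by
  intro t _
  show classify_rules t = classify_rules_alt t
  cases hf : phraseRules.find? (fun p => PySem.Str.isIn p.1 t) with
  | some p =>
    simp only [classify_rules, classify_rules_alt, phraseLoopA_eq_find?, hf, Option.map_some]
  | none =>
    simp only [classify_rules, classify_rules_alt, phraseLoopA_eq_find?, hf, Option.map_none]
    have hnd := PySem.Set.nodup_ofList (PySem.Str.split₀ t)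
    revert hnd
    generalize PySem.Set.ofList (PySem.Str.split₀ t) = ws
    intro hnd
    rcases kwLoopA_char keywordRules ws ("Unknown", 0, []) with ⟨heq, hall⟩ |
      ⟨p, l1, l2, hsplit, heq, hpos, hlt1, hle2⟩
    · -- no keyword scores: both sides fall through to ("Unknown", "none", "")
      rw [heq]
      have hkeys : (kwScanB ws (PySem.Dict.empty, PySem.Dict.empty)).1.keys = [] := by
        rw [List.eq_nil_iff_forall_not_mem]
        intro d hd
        obtain ⟨q, hq, -, hqpos⟩ := (counts_mem_keys ws hnd d).mp hd
        have hle := hall q hq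
        simp only at hle
        omega
      have hsize : (kwScanB ws (PySem.Dict.empty, PySem.Dict.empty)).1.size = 0 := by
        have h1 : (kwScanB ws (PySem.Dict.empty, PySem.Dict.empty)).1.size =
            (kwScanB ws (PySem.Dict.empty, PySem.Dict.empty)).1.keys.length := by
          simp [PySem.Dict.size, PySem.Dict.keys]
        rw [h1, hkeys]
        rfl
      simp [hsize]
    · -- entry p wins in A; show B picks the same department with the same hits
      have hpm : p ∈ keywordRules := hsplit ▸ List.mem_append.mpr (Or.inr List.mem_cons_self)
      have hpos' : 0 < scOf ws p := by simpa using hpos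
      rw [heq]
      rw [if_pos (by simpa [entryOut] using hpos')]
      have hkeymem : p.1 ∈ (kwScanB ws (PySem.Dict.empty, PySem.Dict.empty)).1.keys :=
        (counts_mem_keys ws hnd p.1).mpr ⟨p, hpm, rfl, hpos'⟩
      have hkeysne : (kwScanB ws (PySem.Dict.empty, PySem.Dict.empty)).1.keys ≠ [] := by
        intro h0; rw [h0] at hkeymem; simp at hkeymem
      have hsize : (kwScanB ws (PySem.Dict.empty, PySem.Dict.empty)).1.size ≠ 0 := by
        have h1 : (kwScanB ws (PySem.Dict.empty, PySem.Dict.empty)).1.size =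
            (kwScanB ws (PySem.Dict.empty, PySem.Dict.empty)).1.keys.length := by
          simp [PySem.Dict.size, PySem.Dict.keys]
        rw [h1]
        simpa [List.length_eq_zero_iff] using hkeysne
      rw [if_pos hsize]
      have hvals : (kwScanB ws (PySem.Dict.empty, PySem.Dict.empty)).1.values =
          (kwScanB ws (PySem.Dict.empty, PySem.Dict.empty)).1.keys.map
            (fun k => (kwScanB ws (PySem.Dict.empty, PySem.Dict.empty)).1.getD k 0) :=
        PySem.Dict.values_eq_map_keys _ (kwScanB_counts_keys_nodup ws) 0
      have hvne : (kwScanB ws (PySem.Dict.empty, PySem.Dict.empty)).1.values ≠ [] := by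
        rw [hvals]
        simpa [List.map_eq_nil_iff] using hkeysne
      cases hm : PySem.List.max? (kwScanB ws (PySem.Dict.empty, PySem.Dict.empty)).1.values
          (fun x => x) with
      | none => exact absurd ((PySem.List.max?_eq_none_iff _ _).mp hm) hvne
      | some m =>
        have hq_le : ∀ q ∈ keywordRules, scOf ws q ≤ scOf ws p := by
          intro q hq
          rw [hsplit] at hq
          rcases List.mem_append.mp hq with hq1 | hq2
          · exact le_of_lt (hlt1 q hq1)
          · rcases List.mem_cons.mp hq2 with rfl | hq3
            · exact le_refl _
            · exact hle2 q hq3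
        have hmval : m = scOf ws p := by
          have hmem := PySem.List.max?_mem hm
          rw [hvals] at hmem
          obtain ⟨dk, hdk, hdkv⟩ := List.mem_map.mp hmem
          obtain ⟨q, hq, hfst, -⟩ := (counts_mem_keys ws hnd dk).mp hdk
          have h1 : m ≤ scOf ws p := by
            rw [← hdkv, ← hfst, counts_getD_entry ws q hq, ← scOf_eq_filter_length ws hnd q]
            exact hq_le q hq
          have h2 : scOf ws p ≤ m := by
            have hmemv : (kwScanB ws (PySem.Dict.empty, PySem.Dict.empty)).1.getD p.1 0 ∈
                (kwScanB ws (PySem.Dict.empty, PySem.Dict.empty)).1.values := by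
              rw [hvals]
              exact List.mem_map_of_mem hkeymem
            have hle := PySem.List.max?_isMax hm _ hmemv
            rwa [counts_getD_entry ws p hpm, ← scOf_eq_filter_length ws hnd p] at hle
          omega
        have hpick : deptPickB keywordRules
            (kwScanB ws (PySem.Dict.empty, PySem.Dict.empty)).1 m = some p.1 := by
          rw [hsplit]
          apply deptPickB_first
          · intro q hq
            have hq' : q ∈ keywordRules := hsplit ▸ List.mem_append.mpr (Or.inl hq)
            rw [counts_getD_entry ws q hq', ← scOf_eq_filter_length ws hnd q, hmval]
            exact ne_of_lt (hlt1 q hq)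
          · rw [counts_getD_entry ws p hpm, ← scOf_eq_filter_length ws hnd p, hmval]
        have hhits : (kwScanB ws (PySem.Dict.empty, PySem.Dict.empty)).2.getD p.1 [] =
            ws.filter (fun w => decide (w ∈ p.2)) := hits_getD_entry ws p hpm
        have hsorted : PySem.List.sorted (PySem.Set.inter ws p.2) (fun x => x) false =
            PySem.List.sorted (ws.filter (fun w => decide (w ∈ p.2))) (fun x => x) false :=
          PySem.List.sorted_eq_sorted_of_perm _ _ _ (fun a b h => h) (inter_perm_filter ws hnd p.2)
        simp [entryOut, hpick, hhits, hsorted]
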